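-- pv_equiv track=rewrite | github.com/danielAragon/complejidadAlgoritmica | Homework/tareaSemana01.py | maxVal2
-- ===== SOURCE A (Python) =====
-- def maxVal2(n):
--     maxim1 = 0 #-> 1
--     maxim2 = 0 #-> 1
--     for i in n: #-> n
--         if i >= maxim1:
--             maxim1 = i #-> 1https://ide.c9.io/daragonor/complejidad
--     for i in n: #-> n
--         if i >= maxim2 and i < maxim1:
--             maxim2 = i #-> 1
--     return maxim2
-- ===== SOURCE B (Python) =====
-- def maxVal2(n):
--     m1 = 0
--     m2 = 0
--     for i in n:
--         if i > m1:
--             m2 = m1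
--             m1 = i
--         elif i > m2 and i < m1:
--             m2 = i
--     return m2
-- ===== Notes on version B (the rewrite author's own statement) =====
-- stated objective: simpler
-- what changed: Replaces A's two sequential full scans (one for the max, one for the largest value strictly below it) with a single pass maintaining the top two running values m1 and m2.
import Mathlib
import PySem

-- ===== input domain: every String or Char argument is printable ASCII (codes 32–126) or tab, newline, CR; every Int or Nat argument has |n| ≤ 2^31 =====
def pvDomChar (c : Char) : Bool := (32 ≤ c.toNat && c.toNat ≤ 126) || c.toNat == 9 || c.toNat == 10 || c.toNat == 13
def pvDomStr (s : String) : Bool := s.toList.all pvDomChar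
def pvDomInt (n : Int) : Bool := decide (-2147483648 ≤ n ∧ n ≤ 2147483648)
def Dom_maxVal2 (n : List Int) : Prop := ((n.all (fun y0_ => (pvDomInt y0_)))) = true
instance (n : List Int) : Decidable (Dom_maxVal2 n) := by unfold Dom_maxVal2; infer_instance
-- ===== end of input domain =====

-- B replaces A's two sequential scans by one pass tracking the top two running values; objective: simpler.

-- ===== PORT A =====
-- first loop: maxim1 = i whenever i >= maxim1
def maxVal2Loop1 (m : Int) (l : List Int) : Int :=
  l.foldl (fun m i => if i ≥ m then i else m) m

-- second loop: maxim2 = i whenever i >= maxim2 and i < maxim1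
def maxVal2Loop2 (m1 : Int) (m : Int) (l : List Int) : Int :=
  l.foldl (fun m i => if i ≥ m ∧ i < m1 then i else m) m

def maxVal2 (n : List Int) : Int :=
  maxVal2Loop2 (maxVal2Loop1 0 n) 0 n

-- ===== PORT B =====
-- one step of B's single pass over state (m1, m2)
def maxVal2Step (p : Int × Int) (i : Int) : Int × Int :=
  if i > p.1 then (i, p.1)
  else if i > p.2 ∧ i < p.1 then (p.1, i)
  else p

def maxVal2_alt (n : List Int) : Int :=
  (n.foldl maxVal2Step (0, 0)).2

-- ===== PRECONDITION & SPEC =====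
def Spec_maxVal2 (n : List Int) (out : Int) : Prop := out = maxVal2_alt n
instance (n : List Int) (out : Int) : Decidable (Spec_maxVal2 n out) := by unfold Spec_maxVal2; infer_instance

-- ===== CLAIM (what is proved, stated in full; the proofs are below) =====
def Claim_equal_maxVal2 : Prop := ∀ (n : List Int), Dom_maxVal2 n → Spec_maxVal2 n (maxVal2 n)

-- ===== LEMMAS AND PROOFS =====

theorem le_foldl_max (l : List Int) : ∀ (c : Int), c ≤ l.foldl max c := by
  induction l with
  | nil => intro c; simp
  | cons x t ih =>
    intro c
    simp only [List.foldl_cons]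
    exact le_trans (le_max_left c x) (ih _)

-- A's first loop is foldl max
theorem loop1_eq_max (l : List Int) : ∀ (m : Int), maxVal2Loop1 m l = l.foldl max m := by
  induction l with
  | nil => intro m; rfl
  | cons x t ih =>
    intro m
    simp only [maxVal2Loop1, List.foldl_cons] at *
    rw [show (if x ≥ m then x else m) = max m x by split_ifs <;> omega]
    exact ih _

-- A's second loop is a max-fold over the elements strictly below m1
theorem loop2_eq_filter (m1 : Int) (l : List Int) : ∀ (m : Int),
    maxVal2Loop2 m1 m l = (l.filter (fun x => decide (x < m1))).foldl max m := by
  induction l with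
  | nil => intro m; rfl
  | cons x t ih =>
    intro m
    simp only [maxVal2Loop2, List.foldl_cons, List.filter_cons] at *
    by_cases hx : x < m1
    · rw [show (if x ≥ m ∧ x < m1 then x else m) = max m x by split_ifs <;> omega,
        if_pos (by simpa using hx), List.foldl_cons]
      exact ih _
    · rw [show (if x ≥ m ∧ x < m1 then x else m) = m by split_ifs <;> omega,
        if_neg (by simpa using hx)]
      exact ih _

-- B's single-pass invariant: from state (a, b) with b ≤ a, the pass returns the running
-- max and the max of b together with all values strictly below the final max (a included)
theorem step_invariant (l : List Int) : ∀ (a b : Int), b ≤ a →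
    l.foldl maxVal2Step (a, b) =
      (l.foldl max a,
       ((a :: l).filter (fun x => decide (x < l.foldl max a))).foldl max b) := by
  induction l with
  | nil =>
    intro a b hba
    simp [List.filter]
  | cons i t ih =>
    intro a b hba
    simp only [List.foldl_cons, maxVal2Step]
    by_cases h1 : i > a
    · rw [if_pos h1, ih i a (le_of_lt h1)]; simp only [show max a i = i from by omega]
      have hAi : a < List.foldl max i t := lt_of_lt_of_le h1 (le_foldl_max t i)
      refine Prod.ext rfl ?_
      rw [show List.filter (fun x => decide (x < List.foldl max i t)) (a :: i :: t)
            = a :: List.filter (fun x => decide (x < List.foldl max i t)) (i :: t) from by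
          rw [List.filter_cons, if_pos (by simpa using hAi)]]
      rw [List.foldl_cons, show max b a = a by omega]
    · rw [if_neg h1]
      have haF : a ≤ List.foldl max a t := le_foldl_max t a
      by_cases h2 : i > b ∧ i < a
      · rw [if_pos h2, ih a i (le_of_lt h2.2)]; simp only [show max a i = a from by omega]
        have hiF : i < List.foldl max a t := lt_of_lt_of_le h2.2 haF
        have hi' : decide (i < List.foldl max a t) = true := by simpa using hiF
        refine Prod.ext rfl ?_
        by_cases ha : a < List.foldl max a t
        · have ha' : decide (a < List.foldl max a t) = true := by simpa using ha
          simp only [List.filter_cons, hi', ha', if_true, List.foldl_cons]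
          rw [show max (max b a) i = max i a by omega]
        · have ha' : decide (a < List.foldl max a t) = false := by simpa using ha
          simp only [List.filter_cons, hi', ha', Bool.false_eq_true, if_true, if_false,
            List.foldl_cons]
          rw [show max b i = i by omega]
      · rw [if_neg h2, ih a b hba]; simp only [show max a i = a from by omega]
        refine Prod.ext rfl ?_
        by_cases hi : i < List.foldl max a t
        · have hi' : decide (i < List.foldl max a t) = true := by simpa using hi
          by_cases ha : a < List.foldl max a t
          · have ha' : decide (a < List.foldl max a t) = true := by simpa using ha
            simp only [List.filter_cons, hi', ha', if_true, List.foldl_cons]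
            rw [show max (max b a) i = max b a by omega]
          · have ha' : decide (a < List.foldl max a t) = false := by simpa using ha
            simp only [List.filter_cons, hi', ha', Bool.false_eq_true, if_true, if_false,
              List.foldl_cons]
            rw [show max b i = b by omega]
        · have hi' : decide (i < List.foldl max a t) = false := by simpa using hi
          simp only [List.filter_cons, hi', Bool.false_eq_true, if_false]

-- ===== VERDICT (by name: the statement is the Claim_ definition above) =====
theorem maxVal2_spec : Claim_equal_maxVal2 := by
  intro n _
  unfold Spec_maxVal2 maxVal2 maxVal2_alt
  rw [step_invariant n 0 0 le_rfl, loop1_eq_max, loop2_eq_filter]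
  set M := n.foldl max 0 with hM
  have h0 : (0 : Int) ≤ M := le_foldl_max n 0
  simp only [List.filter_cons]
  by_cases h : (0 : Int) < M
  · simp only [h, decide_true, if_pos, List.foldl_cons, max_self]
  · simp [h]
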